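-- pv_equiv track=rewrite | github.com/nitinworkshere/algos | algos/DynamicProgramming/MinSubsetDifference.py | min_subset_difference
-- ===== SOURCE A (Python) =====
-- def min_subset_difference(arr1, sum1, sum2):
--     if sum1 == sum2:
--         return 0
--
--     if len(arr1) == 0:
--         return sum2 - sum1
--
--     diff1 = min_subset_difference(arr1[1:], sum1, sum2-arr1[0])
--     diff2 = min_subset_difference(arr1[1:], sum1, sum2)
--
--     return min(diff1, diff2)
-- ===== SOURCE B (Python) =====
-- def min_subset_difference(arr1, sum1, sum2):
--     # Layered reachable-difference sets instead of the exponential recursion tree: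
--     # track the set of distinct values sum2' - sum1 reachable at each depth,
--     # pruning exact zeros (the recursion stops there and contributes 0).
--     frontier = {sum2 - sum1}
--     zero_seen = False
--     for a in arr1:
--         if 0 in frontier:
--             zero_seen = True
--         nxt = set()
--         for d in frontier:
--             if d != 0:
--                 nxt.add(d - a)
--                 nxt.add(d)
--         frontier = nxt
--     best = min(frontier) if frontier else 0
--     if zero_seen:
--         best = min(best, 0)
--     return best
-- ===== Notes on version B (the rewrite author's own statement) =====
-- stated objective: faster
-- what changed: B replaces A's exponential two-branch recursion over subsets by a single forward pass that maintains the set of distinct reachable differences sum2' - sum1 (pruning exact zeros, exactly where A's recursion stops), exploring each distinct intermediate difference once instead of once per recursion branch.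
import Mathlib
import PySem

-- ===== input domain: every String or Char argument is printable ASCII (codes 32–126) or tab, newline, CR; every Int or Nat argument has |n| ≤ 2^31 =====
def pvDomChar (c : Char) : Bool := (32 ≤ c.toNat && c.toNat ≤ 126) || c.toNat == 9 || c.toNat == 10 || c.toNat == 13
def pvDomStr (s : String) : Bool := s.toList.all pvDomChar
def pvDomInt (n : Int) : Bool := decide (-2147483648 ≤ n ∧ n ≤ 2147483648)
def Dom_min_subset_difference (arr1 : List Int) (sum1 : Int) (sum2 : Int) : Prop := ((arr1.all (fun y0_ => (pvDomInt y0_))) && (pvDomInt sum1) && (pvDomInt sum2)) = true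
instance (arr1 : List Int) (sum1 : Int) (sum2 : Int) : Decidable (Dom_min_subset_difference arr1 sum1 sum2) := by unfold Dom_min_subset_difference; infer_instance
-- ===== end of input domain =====

-- B replaces A's exponential two-branch recursion tree by one forward pass over the array
-- that maintains the SET of distinct reachable differences (pruning exact zeros, as A does);
-- objective: faster (each distinct intermediate difference is explored once, not once per branch).

-- ===== PORT A =====
-- Literal transliteration of A: check sum1 == sum2, then the empty case, then
-- recurse on arr1[1:] with sum2 - arr1[0] and with sum2, returning min.
def min_subset_difference (arr1 : List Int) (sum1 : Int) (sum2 : Int) : Int :=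
  if sum1 = sum2 then 0
  else
    match arr1 with
    | [] => sum2 - sum1
    | a :: tl =>
      let diff1 := min_subset_difference tl sum1 (sum2 - a)
      let diff2 := min_subset_difference tl sum1 sum2
      min diff1 diff2

-- ===== PORT B =====
-- inner loop: for d in frontier: if d != 0: nxt.add(d - a); nxt.add(d)
def pvStep (a : Int) (frontier : PySem.Set Int) : PySem.Set Int :=
  frontier.foldl
    (fun nxt d => if d ≠ 0 then PySem.Set.add (PySem.Set.add nxt (d - a)) d else nxt)
    PySem.Set.empty

-- outer loop: for a in arr1: (zero check, then rebuild the frontier)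
def pvLoop : List Int → PySem.Set Int → Bool → PySem.Set Int × Bool
  | [], frontier, zero_seen => (frontier, zero_seen)
  | a :: rest, frontier, zero_seen =>
    let zero_seen' := if PySem.Set.contains frontier 0 then true else zero_seen
    pvLoop rest (pvStep a frontier) zero_seen'

def min_subset_difference_alt (arr1 : List Int) (sum1 : Int) (sum2 : Int) : Int :=
  let st := pvLoop arr1 (PySem.Set.ofList [sum2 - sum1]) false
  let best :=
    match PySem.List.min? st.1 (fun x => x) with
    | some m => m
    | none => (0 : Int)
  if st.2 then min best 0 else best

-- ===== PRECONDITION & SPEC =====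
def Spec_min_subset_difference (arr1 : List Int) (sum1 : Int) (sum2 : Int) (out : Int) : Prop := out = min_subset_difference_alt arr1 sum1 sum2
instance (arr1 : List Int) (sum1 : Int) (sum2 : Int) (out : Int) : Decidable (Spec_min_subset_difference arr1 sum1 sum2 out) := by unfold Spec_min_subset_difference; infer_instance

-- ===== CLAIM (what is proved, stated in full; the proofs are below) =====
def Claim_equal_min_subset_difference : Prop := ∀ (arr1 : List Int) (sum1 : Int) (sum2 : Int), Dom_min_subset_difference arr1 sum1 sum2 → Spec_min_subset_difference arr1 sum1 sum2 (min_subset_difference arr1 sum1 sum2)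

-- ===== LEMMAS AND PROOFS =====

-- A depends on (sum1, sum2) only through the difference sum2 - sum1.
theorem msd_shift (l : List Int) (s1 s2 : Int) :
    min_subset_difference l s1 s2 = min_subset_difference l 0 (s2 - s1) := by
  induction l generalizing s2 with
  | nil =>
    simp only [min_subset_difference]
    split_ifs <;> omega
  | cons a tl ih =>
    simp only [min_subset_difference]
    by_cases h : s1 = s2
    · rw [if_pos h, if_pos (by omega)]
    · rw [if_neg h, if_neg (show ¬ (0:Int) = s2 - s1 by omega)]
      rw [ih (s2 - a), ih s2, show s2 - a - s1 = s2 - s1 - a by omega]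

theorem msd_nil (d : Int) : min_subset_difference [] 0 d = d := by
  simp only [min_subset_difference]
  by_cases h : (0:Int) = d
  · simp [← h]
  · rw [if_neg h]; omega

theorem msd_cons_zero (l : List Int) : min_subset_difference l 0 0 = 0 := by
  cases l <;> simp [min_subset_difference]

-- minimum is determined by mutual domination of the element sets
theorem min?_eq_of_dominate (L1 L2 : List Int)
    (h1 : ∀ x ∈ L1, ∃ y ∈ L2, y ≤ x) (h2 : ∀ y ∈ L2, ∃ x ∈ L1, x ≤ y) :
    L1.min? = L2.min? := by
  cases L1 with
  | nil =>
    cases L2 with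
    | nil => rfl
    | cons y u => exact absurd (h2 y (by simp)) (by simp)
  | cons x t =>
    cases L2 with
    | nil => exact absurd (h1 x (by simp)) (by simp)
    | cons y u =>
      show some (t.foldl min x) = some (u.foldl min y)
      have m1min := PySem.List.foldl_min_le t x
      have m2min := PySem.List.foldl_min_le u y
      have m1mem := PySem.List.foldl_min_mem t x
      have m2mem := PySem.List.foldl_min_mem u y
      have le1 : ∀ z ∈ x :: t, t.foldl min x ≤ z := by
        intro z hz; rcases List.mem_cons.mp hz with h | h
        · exact h ▸ m1min.1
        · exact m1min.2 z h
      have le2 : ∀ z ∈ y :: u, u.foldl min y ≤ z := by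
        intro z hz; rcases List.mem_cons.mp hz with h | h
        · exact h ▸ m2min.1
        · exact m2min.2 z h
      have mem1 : t.foldl min x ∈ x :: t := by
        rcases m1mem with h | h
        · rw [h]; exact List.mem_cons_self
        · exact List.mem_cons_of_mem _ h
      have mem2 : u.foldl min y ∈ y :: u := by
        rcases m2mem with h | h
        · rw [h]; exact List.mem_cons_self
        · exact List.mem_cons_of_mem _ h
      obtain ⟨b, hb, hble⟩ := h2 _ mem2
      obtain ⟨c, hc, hcle⟩ := h1 _ mem1
      exact congrArg some (le_antisymm (le_trans (le1 b hb) hble) (le_trans (le2 c hc) hcle))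

-- membership in the rebuilt frontier
theorem mem_pvStep (a : Int) (S : PySem.Set Int) (e : Int) :
    e ∈ pvStep a S ↔ ∃ d ∈ S, d ≠ 0 ∧ (e = d - a ∨ e = d) := by
  unfold pvStep
  have key : ∀ (L acc : List Int),
      e ∈ L.foldl (fun nxt d => if d ≠ 0 then PySem.Set.add (PySem.Set.add nxt (d - a)) d else nxt) acc
        ↔ e ∈ acc ∨ ∃ d ∈ L, d ≠ 0 ∧ (e = d - a ∨ e = d) := by
    intro L
    induction L with
    | nil => simp
    | cons d t ih =>
      intro acc
      simp only [List.foldl_cons, ih]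
      by_cases hd : d = 0
      · simp [hd]
      · rw [if_pos hd]
        simp only [PySem.Set.mem_add, List.mem_cons]
        constructor
        · rintro (((h | h) | h) | ⟨d', hd', hne, he⟩)
          · exact Or.inl h
          · exact Or.inr ⟨d, Or.inl rfl, hd, Or.inl h⟩
          · exact Or.inr ⟨d, Or.inl rfl, hd, Or.inr h⟩
          · exact Or.inr ⟨d', Or.inr hd', hne, he⟩
        · rintro (h | ⟨d', (rfl | hd'), hne, he⟩)
          · exact Or.inl (Or.inl (Or.inl h))
          · rcases he with he | he
            · exact Or.inl (Or.inl (Or.inr he))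
            · exact Or.inl (Or.inr he)
          · exact Or.inr ⟨d', hd', hne, he⟩
  rw [key]
  simp [PySem.Set.empty]

-- abstract value of B's final computation
def pvFinish (st : PySem.Set Int × Bool) : Int :=
  let best :=
    match PySem.List.min? st.1 (fun x => x) with
    | some m => m
    | none => (0 : Int)
  if st.2 then min best 0 else best

theorem pymin_eq (xs : List Int) : PySem.List.min? xs (fun y => y) = xs.min? := by
  cases xs <;> simp [PySem.List.min?_id_cons, List.min?]

-- the combined "value" of a state, as a min? over an explicit list
def pvVal (l : List Int) (S : List Int) (z : Bool) : Option Int :=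
  ((S.map (fun d => min_subset_difference l 0 d)) ++ (if z then [0] else [])).min?

theorem pvFinish_base (S : PySem.Set Int) (z : Bool) :
    pvFinish (S, z) = (pvVal [] S z).getD 0 := by
  unfold pvFinish pvVal
  have hmap : S.map (fun d => min_subset_difference [] 0 d) = S := by
    simp [msd_nil]
  rw [hmap, pymin_eq]
  cases z with
  | false =>
    cases h : (S : List Int).min? <;> simp [h]
  | true =>
    cases S with
    | nil => simp [List.min?]
    | cons x t =>
      rw [List.cons_append]
      show min (t.foldl min x) 0 = (x :: (t ++ if true = true then [0] else [])).min?.getD 0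
      rw [show (if (true : Bool) = true then ([0] : List Int) else []) = [0] from rfl]
      show min (t.foldl min x) 0 = (t ++ [0]).foldl min x
      rw [List.foldl_append]
      rfl

theorem tailmem (w : Bool) (x : Int) :
    x ∈ (if w = true then ([0] : List Int) else []) ↔ (w = true ∧ x = 0) := by
  cases w <;> simp

theorem pvVal_step (a : Int) (l : List Int) (S : PySem.Set Int) (z : Bool) :
    pvVal (a :: l) S z
      = pvVal l (pvStep a S) (if PySem.Set.contains S 0 then true else z) := by
  unfold pvVal
  apply min?_eq_of_dominate
  · -- every element of the (a :: l)-value list is dominated by one of the stepped list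
    intro x hx
    rcases List.mem_append.mp hx with hx | hx
    · obtain ⟨d, hd, rfl⟩ := List.mem_map.mp hx
      by_cases hd0 : d = 0
      · have hc : PySem.Set.contains S 0 = true := by
          simp only [pysem]
          exact List.elem_eq_true_of_mem (by exact_mod_cast hd0 ▸ hd)
        refine ⟨0, List.mem_append.mpr (Or.inr ((tailmem _ _).mpr ⟨by rw [if_pos hc], rfl⟩)), ?_⟩
        subst hd0; rw [msd_cons_zero]
      · have hexp : min_subset_difference (a :: l) 0 d
            = min (min_subset_difference l 0 (d - a)) (min_subset_difference l 0 d) := by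
          simp only [min_subset_difference]
          rw [if_neg (by omega)]
        rcases min_choice (min_subset_difference l 0 (d - a)) (min_subset_difference l 0 d)
          with h | h
        · refine ⟨min_subset_difference l 0 (d - a),
            List.mem_append.mpr (Or.inl (List.mem_map.mpr
              ⟨d - a, (mem_pvStep a S _).mpr ⟨d, hd, hd0, Or.inl rfl⟩, rfl⟩)), ?_⟩
          rw [hexp, h]
        · refine ⟨min_subset_difference l 0 d,
            List.mem_append.mpr (Or.inl (List.mem_map.mpr
              ⟨d, (mem_pvStep a S _).mpr ⟨d, hd, hd0, Or.inr rfl⟩, rfl⟩)), ?_⟩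
          rw [hexp, h]
    · -- x = 0 contributed by zero_seen
      obtain ⟨hz, rfl⟩ := (tailmem z x).mp hx
      refine ⟨0, List.mem_append.mpr (Or.inr ((tailmem _ _).mpr ⟨?_, rfl⟩)), le_refl 0⟩
      cases hcc : PySem.Set.contains S 0 <;> simp [hz]
  · -- every element of the stepped list is dominated by one of the (a :: l)-value list
    intro y hy
    rcases List.mem_append.mp hy with hy | hy
    · obtain ⟨e, he, rfl⟩ := List.mem_map.mp hy
      obtain ⟨d, hd, hd0, hcase⟩ := (mem_pvStep a S e).mp he
      refine ⟨min_subset_difference (a :: l) 0 d,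
        List.mem_append.mpr (Or.inl (List.mem_map.mpr ⟨d, hd, rfl⟩)), ?_⟩
      have hexp : min_subset_difference (a :: l) 0 d
          = min (min_subset_difference l 0 (d - a)) (min_subset_difference l 0 d) := by
        simp only [min_subset_difference]
        rw [if_neg (by omega)]
      rcases hcase with rfl | rfl
      · rw [hexp]; exact min_le_left _ _
      · rw [hexp]; exact min_le_right _ _
    · -- y = 0 contributed by the new zero flag
      obtain ⟨hw, rfl⟩ := (tailmem _ y).mp hy
      by_cases hc : PySem.Set.contains S 0 = true
      · have h0S : (0:Int) ∈ S := by simpa using hc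
        exact ⟨min_subset_difference (a :: l) 0 0,
          List.mem_append.mpr (Or.inl (List.mem_map.mpr ⟨0, h0S, rfl⟩)),
          by rw [msd_cons_zero]⟩
      · have hz : z = true := by rwa [if_neg hc] at hw
        exact ⟨0, List.mem_append.mpr (Or.inr ((tailmem z 0).mpr ⟨hz, rfl⟩)), le_refl 0⟩

theorem pvLoop_spec (l : List Int) (S : PySem.Set Int) (z : Bool) :
    pvFinish (pvLoop l S z) = (pvVal l S z).getD 0 := by
  induction l generalizing S z with
  | nil => exact pvFinish_base S z
  | cons a t ih =>
    show pvFinish (pvLoop t (pvStep a S) _) = _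
    rw [ih, ← pvVal_step]

-- ===== VERDICT (by name: the statement is the Claim_ definition above) =====
theorem min_subset_difference_spec : Claim_equal_min_subset_difference := by
  intro arr1 sum1 sum2 _
  unfold Spec_min_subset_difference
  have halt : min_subset_difference_alt arr1 sum1 sum2
      = pvFinish (pvLoop arr1 (PySem.Set.ofList [sum2 - sum1]) false) := rfl
  rw [halt, pvLoop_spec]
  have hset : (PySem.Set.ofList [sum2 - sum1] : List Int) = [sum2 - sum1] := rfl
  rw [hset]
  unfold pvVal
  rw [show (if (false : Bool) = true then ([0] : List Int) else []) = [] from rfl]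
  simp only [List.map_cons, List.map_nil, List.append_nil]
  show min_subset_difference arr1 sum1 sum2
      = ([min_subset_difference arr1 0 (sum2 - sum1)].min?).getD 0
  rw [msd_shift arr1 sum1 sum2]
  rfl
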